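-- pv_equiv track=rewrite | github.com/theniveshr/SMART-TAG | backend/app/fraud_detection.py | _has_pattern_anomaly
-- ===== SOURCE A (Python) =====
-- def _has_pattern_anomaly(plate: str) -> bool:
--     """Detect plates with all-zero digit sections or repeating chars."""
--     plate = plate.strip().upper().replace(" ", "")
--     # All zeros in digit section
--     if "0000" in plate:
--         return True
--     # Repeating character runs (AAAA, 1111)
--     for ch in set(plate):
--         if plate.count(ch) >= 5:
--             return True
--     return False
-- ===== SOURCE B (Python) =====
-- def _has_pattern_anomaly(plate: str) -> bool:
--     """Detect plates with all-zero digit sections or repeating chars."""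
--     plate = plate.strip().upper().replace(" ", "")
--     if "0000" in plate:
--         return True
--     run = 0
--     prev = None
--     for ch in sorted(plate):
--         if ch == prev:
--             run += 1
--         else:
--             run = 1
--         prev = ch
--         if run >= 5:
--             return True
--     return False
-- ===== Notes on version B (the rewrite author's own statement) =====
-- stated objective: alternative
-- what changed: Replaces A's loop over set(plate) with a plate.count(ch) full-string scan per distinct character by sorting the characters once and walking the sorted sequence in a single pass, maintaining a current-run counter that resets on character change and returning True as soon as a run reaches 5.
import Mathlib
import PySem

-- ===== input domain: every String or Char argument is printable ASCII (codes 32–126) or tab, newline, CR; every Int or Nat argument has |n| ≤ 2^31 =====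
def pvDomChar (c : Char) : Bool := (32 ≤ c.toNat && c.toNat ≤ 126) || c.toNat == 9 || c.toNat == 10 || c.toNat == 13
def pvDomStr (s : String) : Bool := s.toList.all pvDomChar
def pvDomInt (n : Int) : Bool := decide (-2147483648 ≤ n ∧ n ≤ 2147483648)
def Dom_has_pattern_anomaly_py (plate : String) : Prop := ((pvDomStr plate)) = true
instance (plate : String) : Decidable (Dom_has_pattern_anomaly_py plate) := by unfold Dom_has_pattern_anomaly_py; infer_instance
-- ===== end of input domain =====

-- ===== PORT A =====
-- B changes only the repeated-character check: a single pass over the sorted characters instead of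
-- a plate.count scan per distinct character (alternative decomposition, same results).
-- plate.count(ch) with ch a single character is ported as PySem.Chars.count p [ch] (exact).
def has_pattern_anomaly_py (plate : String) : Bool :=
  let p := PySem.Chars.replace (PySem.Chars.upper (PySem.Chars.strip plate.toList)) [' '] []
  if PySem.Chars.isIn ['0','0','0','0'] p then true
  else (PySem.Set.ofList p).any (fun ch => decide (5 ≤ PySem.Chars.count p [ch]))

-- ===== PORT B =====
-- the run-scan loop of Source B: prev/run state, run resets when the character changes, early True at run ≥ 5
def pvRunScan : Option Char → Nat → List Char → Bool
  | _, _, [] => false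
  | prev, run, c :: cs =>
      let run' := if some c = prev then run + 1 else 1
      if 5 ≤ run' then true else pvRunScan (some c) run' cs

def has_pattern_anomaly_py_alt (plate : String) : Bool :=
  let p := PySem.Chars.replace (PySem.Chars.upper (PySem.Chars.strip plate.toList)) [' '] []
  if PySem.Chars.isIn ['0','0','0','0'] p then true
  else pvRunScan none 0 (PySem.List.sorted p (fun c => c) false)

-- ===== PRECONDITION & SPEC =====
def Spec_has_pattern_anomaly_py (plate : String) (out : Bool) : Prop := out = has_pattern_anomaly_py_alt plate
instance (plate : String) (out : Bool) : Decidable (Spec_has_pattern_anomaly_py plate out) := by unfold Spec_has_pattern_anomaly_py; infer_instance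

-- ===== CLAIM (what is proved, stated in full; the proofs are below) =====
def Claim_equal_has_pattern_anomaly_py : Prop := ∀ (plate : String), Dom_has_pattern_anomaly_py plate → Spec_has_pattern_anomaly_py plate (has_pattern_anomaly_py plate)

-- ===== LEMMAS AND PROOFS =====

-- str.count with a single-character needle is the character count
theorem pvCountGo_singleton (c : Char) (l : List Char) : ∀ (fuel acc : Nat), l.length ≤ fuel →
    PySem.Chars.count.go [c] fuel l acc = acc + l.count c := by
  induction l with
  | nil => intro fuel acc _; cases fuel <;> simp [PySem.Chars.count.go]
  | cons h t ih =>
      intro fuel acc hlen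
      cases fuel with
      | zero => simp at hlen
      | succ f =>
          have hft : t.length ≤ f := by simpa using hlen
          by_cases hc : c = h
          · subst hc
            simp [PySem.Chars.count.go, List.isPrefixOf, ih f (acc+1) hft]
            omega
          · simp [PySem.Chars.count.go, List.isPrefixOf, hc, ih f acc hft, Ne.symm hc]

theorem pvCount_singleton (s : List Char) (c : Char) :
    PySem.Chars.count s [c] = s.count c := by
  simpa [PySem.Chars.count] using pvCountGo_singleton c s s.length 0 le_rfl

-- A's loop over set(plate): true iff some character has count ≥ 5
theorem pvA_loop (p : List Char) :
    ((PySem.Set.ofList p).any (fun ch => decide (5 ≤ PySem.Chars.count p [ch])) = true) ↔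
      ∃ c, 5 ≤ p.count c := by
  simp only [List.any_eq_true, pvCount_singleton, decide_eq_true_eq]
  constructor
  · rintro ⟨c, _, hc⟩; exact ⟨c, hc⟩
  · rintro ⟨c, hc⟩
    refine ⟨c, ?_, hc⟩
    have : c ∈ p := List.count_pos_iff.1 (by omega)
    simpa [PySem.Set.mem_ofList] using this

-- the run scan on a sorted tail, with prev = p below every element and run k < 5
theorem pvRunScan_sorted (l : List Char) : ∀ (p : Char) (k : Nat), k < 5 →
    l.Pairwise (· ≤ ·) → (∀ x ∈ l, p ≤ x) →
    ((pvRunScan (some p) k l = true) ↔ ∃ c, 5 ≤ (if c = p then k else 0) + l.count c) := by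
  induction l with
  | nil =>
      intro p k hk _ _
      simp [pvRunScan]
      intro c; split <;> omega
  | cons h t ih =>
      intro p k hk hpw hlb
      have hpw' : t.Pairwise (· ≤ ·) := hpw.tail
      have hht : ∀ x ∈ t, h ≤ x := fun x hx => (List.pairwise_cons.1 hpw).1 x hx
      by_cases hh : h = p
      · subst hh
        by_cases h5 : 5 ≤ k + 1
        · constructor
          · intro _
            refine ⟨h, ?_⟩
            simp [List.count_cons]; omega
          · intro _
            simp [pvRunScan, h5]
        · have hstep : pvRunScan (some h) k (h :: t) = pvRunScan (some h) (k + 1) t := by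
            simp [pvRunScan, h5]
          have hcc : ∀ c : Char, (if c = h then k + 1 else 0) + t.count c
              = (if c = h then k else 0) + (h :: t).count c := by
            intro c
            by_cases hch : c = h
            · subst hch; simp [List.count_cons]; omega
            · simp [List.count_cons, hch, Ne.symm hch]
          rw [hstep, ih h (k + 1) (by omega) hpw' hht]
          exact ⟨fun ⟨c, hc⟩ => ⟨c, by rw [← hcc c]; exact hc⟩,
                 fun ⟨c, hc⟩ => ⟨c, by rw [hcc c]; exact hc⟩⟩
      · have hlt : p < h := lt_of_le_of_ne (hlb h (by simp)) (fun e => hh e.symm)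
        have hpt : p ∉ t := fun hm => absurd (hht p hm) (not_le.2 hlt)
        have hpc : t.count p = 0 := List.count_eq_zero.2 hpt
        have hstep : pvRunScan (some p) k (h :: t) = pvRunScan (some h) 1 t := by
          simp [pvRunScan, hh]
        rw [hstep, ih h 1 (by omega) hpw' hht]
        constructor
        · rintro ⟨c, hc⟩
          have hcp : c ≠ p := by
            rintro rfl; rw [hpc] at hc
            revert hc; split <;> omega
          refine ⟨c, ?_⟩
          by_cases hch : c = h
          · subst hch; simp [List.count_cons, hcp] at hc ⊢; omega
          · simp [List.count_cons, hcp, hch, Ne.symm hch] at hc ⊢; omega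
        · rintro ⟨c, hc⟩
          by_cases hcp : c = p
          · subst hcp
            simp [List.count_cons, hh, hpc] at hc; omega
          · refine ⟨c, ?_⟩
            by_cases hch : c = h
            · subst hch; simp [List.count_cons, hcp] at hc ⊢; omega
            · simp [List.count_cons, hcp, hch, Ne.symm hch] at hc ⊢; omega

-- B's run scan from the initial (None, 0) state over a sorted list
theorem pvRunScan_start (l : List Char) (hpw : l.Pairwise (· ≤ ·)) :
    ((pvRunScan none 0 l = true) ↔ ∃ c, 5 ≤ l.count c) := by
  cases l with
  | nil => simp [pvRunScan]
  | cons h t =>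
      have hht : ∀ x ∈ t, h ≤ x := fun x hx => (List.pairwise_cons.1 hpw).1 x hx
      have hstep : pvRunScan none 0 (h :: t) = pvRunScan (some h) 1 t := by
        simp [pvRunScan]
      have hcc : ∀ c : Char, (if c = h then 1 else 0) + t.count c = (h :: t).count c := by
        intro c
        by_cases hch : c = h
        · subst hch; simp [List.count_cons]; omega
        · simp [List.count_cons, hch, Ne.symm hch]
      rw [hstep, pvRunScan_sorted t h 1 (by omega) hpw.tail hht]
      exact ⟨fun ⟨c, hc⟩ => ⟨c, by rw [← hcc c]; exact hc⟩,
             fun ⟨c, hc⟩ => ⟨c, by rw [hcc c]; exact hc⟩⟩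

-- ===== VERDICT (by name: the statement is the Claim_ definition above) =====
theorem has_pattern_anomaly_py_spec : Claim_equal_has_pattern_anomaly_py := by
  intro plate _
  unfold Spec_has_pattern_anomaly_py has_pattern_anomaly_py has_pattern_anomaly_py_alt
  set p := PySem.Chars.replace (PySem.Chars.upper (PySem.Chars.strip plate.toList)) [' '] [] with hp
  by_cases h0 : PySem.Chars.isIn ['0','0','0','0'] p = true
  · simp [h0]
  · simp only [h0, if_false, Bool.false_eq_true]
    have hperm : (PySem.List.sorted p (fun c => c) false).Perm p := PySem.List.sorted_perm p _ false
    have hpw : (PySem.List.sorted p (fun c => c) false).Pairwise (· ≤ ·) := by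
      simpa using PySem.List.sorted_pairwise p (fun c => c)
    have hcnt : ∀ c : Char, (PySem.List.sorted p (fun c => c) false).count c = p.count c :=
      fun c => hperm.count_eq c
    rcases Bool.eq_false_or_eq_true ((PySem.Set.ofList p).any (fun ch => decide (5 ≤ PySem.Chars.count p [ch]))) with hA | hA
    · obtain ⟨c, hc⟩ := (pvA_loop p).1 hA
      have hB := (pvRunScan_start _ hpw).2 ⟨c, by rw [hcnt c]; exact hc⟩
      rw [hA, hB]
    · rcases Bool.eq_false_or_eq_true (pvRunScan none 0 (PySem.List.sorted p (fun c => c) false)) with hB | hB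
      · exfalso
        obtain ⟨c, hc⟩ := (pvRunScan_start _ hpw).1 hB
        rw [hcnt c] at hc
        have := (pvA_loop p).2 ⟨c, hc⟩
        rw [hA] at this; exact Bool.false_ne_true this
      · rw [hA, hB]
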